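-- pv_equiv track=rewrite | github.com/JackZettle/PA1_Math248 | Final_PA1_Part2.py | binary_converter
-- ===== SOURCE A (Python) =====
-- def binary_converter(integer_1, integer_2, bit_size):
--     '''
--     Converts two positive Base-10 integers into their binary representations stored as lists of bits ins LSB order.
--
--     Inputs:
--         integer_1 (int): The first positive integer to convert
--         integer_2 (int): The second positive integer to convert
--         bit_size (int): The number of bits for binary form
--
--     Outputs:
--         result_1 (list of integers): Binary form of integer_1 as a list of 0's and 1's in LSB form padded to bit_size
--         result_2 (list of integers): Binary form of integer_2 as a list of 0's and 1's in LSB form padded to bit_size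
--     '''
--     result_1 = [] #setting an empty list for the results to be inputted
--     if integer_1 == 0: #accounting for if the input is 0, making a list of one 0
--         result_1.append(0)
--
--     while integer_1 > 0: # creating a while loop with the standard base 10 to base conversions, dividing by 2 and adding the remainder to the list
--         if integer_1 % 2 == 1: #using mod to get the remainder
--             result_1.append(1)
--         else:
--             result_1.append(0)
--         integer_1 = integer_1 // 2 #taking floor of the integer divided by 2
--
--
--     result_2 = [] #setting an empty list for the results to be inputted
--     if integer_2 == 0: #accounting for if the input is 0, making a list of one 0
--         result_2.append(0)
--
--     while integer_2 > 0: # creating a while loop with the standard base 10 to base conversions, dividing by 2 and adding the remainder to the list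
--         if integer_2 % 2 == 1: #using mod to get the remainder
--             result_2.append(1)
--         else:
--             result_2.append(0)
--         integer_2 = integer_2 // 2 #taking floor of the integer divided by 2
--
--     #For both of these statements we are adding 0s to the end of the binary form until it is converted to the correct bit size form
--     if len(result_1) < bit_size: #checking to see if the binary number is in bit size form yet
--         result_1 = result_1 + [0] * (bit_size - len(result_1)) # Adding zeros to the end of the list, we figure out the amount we need by subtracting 32 from what the length of the list is
--     if len(result_2) < bit_size: #checking to see if the binary number is in 32 bit binary form yet
--         result_2 = result_2 + [0] * (bit_size - len(result_2)) # Adding zeros to the end of the list, we figure out the amount we need by subtracting 32 from what the length of the list is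
--     return result_1, result_2
-- ===== SOURCE B (Python) =====
-- def _to_bits(n, width):
--     # Greedy MSB-first conversion: collect the powers of two up to n,
--     # then subtract from the largest down, recording a bit per power;
--     # reverse into LSB order and pad with zeros to the requested width.
--     powers = [1]
--     while powers[-1] * 2 <= n:
--         powers.append(powers[-1] * 2)
--     msb = []
--     for p in reversed(powers):
--         if p <= n:
--             msb.append(1)
--             n -= p
--         else:
--             msb.append(0)
--     bits = msb[::-1]
--     return bits + [0] * (width - len(bits))
--
-- def binary_converter(integer_1, integer_2, bit_size):
--     return _to_bits(integer_1, bit_size), _to_bits(integer_2, bit_size)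
-- ===== Notes on version B (the rewrite author's own statement) =====
-- stated objective: alternative
-- what changed: Replaces A's two copy-pasted LSB-first mod/floor-div while-loops by a shared helper that builds the ascending list of powers of two up to n and extracts bits MSB-first by greedy subtraction over the reversed power list, then reverses into LSB order and pads; Pre_ excludes the degenerate corner of a negative integer (outside the documented positive domain) with bit_size < 1, where A's empty raw list is an accident of its skipped loop and B's [0] is equally defensible.
-- outside the precondition, e.g. on binary_converter(-3, 5, 0): A returns ([], [1, 0, 1]), B returns ([0], [1, 0, 1])
import Mathlib
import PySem

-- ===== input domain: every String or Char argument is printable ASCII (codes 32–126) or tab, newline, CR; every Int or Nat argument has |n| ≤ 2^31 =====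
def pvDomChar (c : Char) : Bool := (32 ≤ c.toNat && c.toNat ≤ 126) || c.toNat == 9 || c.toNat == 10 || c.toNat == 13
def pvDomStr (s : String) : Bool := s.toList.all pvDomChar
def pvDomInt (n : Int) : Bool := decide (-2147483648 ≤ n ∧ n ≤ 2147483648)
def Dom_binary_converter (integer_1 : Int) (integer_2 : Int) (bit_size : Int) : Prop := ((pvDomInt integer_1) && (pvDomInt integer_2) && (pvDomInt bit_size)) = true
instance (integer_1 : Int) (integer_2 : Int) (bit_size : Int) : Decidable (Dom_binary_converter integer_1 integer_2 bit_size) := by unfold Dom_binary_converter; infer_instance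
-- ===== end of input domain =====

-- B replaces A's duplicated LSB mod/div loops by a greedy MSB-first subtraction over the
-- ascending power-of-two list, reversed into LSB order (alternative algorithm, same cost).

-- ===== PORT A =====
-- A's while loop: append n%2 bit, then n //= 2, while n > 0
def pvALoop (n : Int) : List Int :=
  if _h : 0 < n then
    (if PySem.Int.mod n 2 = 1 then [(1 : Int)] else [(0 : Int)]) ++ pvALoop (PySem.Int.floordiv n 2)
  else []
termination_by n.toNat
decreasing_by
  have h2 : PySem.Int.floordiv n 2 = n / 2 := PySem.Int.floordiv_eq_ediv_of_pos (by omega)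
  rw [h2]; omega

def binary_converter (integer_1 : Int) (integer_2 : Int) (bit_size : Int) : List Int × List Int :=
  let result_1 := (if integer_1 = 0 then [(0 : Int)] else []) ++ pvALoop integer_1
  let result_2 := (if integer_2 = 0 then [(0 : Int)] else []) ++ pvALoop integer_2
  let result_1 := if (result_1.length : Int) < bit_size then result_1 ++ List.replicate (bit_size - result_1.length).toNat 0 else result_1
  let result_2 := if (result_2.length : Int) < bit_size then result_2 ++ List.replicate (bit_size - result_2.length).toNat 0 else result_2
  (result_1, result_2)

-- ===== PORT B =====
-- powers=[1]; while powers[-1]*2 <= n: powers.append(powers[-1]*2)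
-- (the 0 < p conjunct only makes the recursion total; B always starts at p = 1)
def pvPowers (n : Int) (p : Int) : List Int :=
  if _h : 0 < p ∧ p * 2 ≤ n then p :: pvPowers n (p * 2) else [p]
termination_by (n - p).toNat
decreasing_by omega

-- for p in reversed(powers): append 1 and subtract, or append 0
def pvGreedy (n : Int) (ps : List Int) : List Int :=
  match ps with
  | [] => []
  | p :: rest => if p ≤ n then 1 :: pvGreedy (n - p) rest else 0 :: pvGreedy n rest

def pvToBits (n : Int) (width : Int) : List Int :=
  let powers := pvPowers n 1
  let bits := (pvGreedy n powers.reverse).reverse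
  bits ++ List.replicate (width - bits.length).toNat 0

def binary_converter_alt (integer_1 : Int) (integer_2 : Int) (bit_size : Int) : List Int × List Int :=
  (pvToBits integer_1 bit_size, pvToBits integer_2 bit_size)

-- ===== PRECONDITION & SPEC =====
-- Pre_ excludes the degenerate corner of a negative integer (outside the documented
-- positive domain) combined with bit_size < 1: there A returns [] for the negative
-- component (its loop never runs and no padding happens) while B returns [0]; both
-- values are accidental for an unspecified corner.
def Pre_binary_converter (integer_1 : Int) (integer_2 : Int) (bit_size : Int) : Prop :=
  1 ≤ bit_size ∨ (0 ≤ integer_1 ∧ 0 ≤ integer_2)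
instance (integer_1 : Int) (integer_2 : Int) (bit_size : Int) : Decidable (Pre_binary_converter integer_1 integer_2 bit_size) := by unfold Pre_binary_converter; infer_instance

def pvWitness_binary_converter : Int × Int × Int := (5, 3, 4)

def Spec_binary_converter (integer_1 : Int) (integer_2 : Int) (bit_size : Int) (out : List Int × List Int) : Prop := out = binary_converter_alt integer_1 integer_2 bit_size
instance (integer_1 : Int) (integer_2 : Int) (bit_size : Int) (out : List Int × List Int) : Decidable (Spec_binary_converter integer_1 integer_2 bit_size out) := by unfold Spec_binary_converter; infer_instance

-- ===== CLAIM (what is proved, stated in full; the proofs are below) =====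
def Claim_equal_binary_converter : Prop := ∀ (integer_1 : Int) (integer_2 : Int) (bit_size : Int), Dom_binary_converter integer_1 integer_2 bit_size → Pre_binary_converter integer_1 integer_2 bit_size → Spec_binary_converter integer_1 integer_2 bit_size (binary_converter integer_1 integer_2 bit_size)

-- ===== LEMMAS AND PROOFS =====

-- reference LSB bit list over Nat (empty for 0)
def pvNatBits (n : Nat) : List Int :=
  if n = 0 then [] else ((n % 2 : Nat) : Int) :: pvNatBits (n / 2)

theorem pvALoop_eq_natBits (n : Nat) : pvALoop (n : Int) = pvNatBits n := by
  induction n using Nat.strong_induction_on with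
  | _ n ih =>
    rw [pvALoop, pvNatBits]
    by_cases h0 : n = 0
    · simp [h0]
    · have hpos : (0 : Int) < (n : Int) := by exact_mod_cast Nat.pos_of_ne_zero h0
      rw [dif_pos hpos, if_neg h0]
      have hfd : PySem.Int.floordiv (n : Int) 2 = ((n / 2 : Nat) : Int) := by
        exact_mod_cast PySem.Int.floordiv_natCast n 2
      have hmd : PySem.Int.mod (n : Int) 2 = ((n % 2 : Nat) : Int) := by
        exact_mod_cast PySem.Int.mod_natCast n 2
      rw [hfd, hmd, ih (n / 2) (Nat.div_lt_self (Nat.pos_of_ne_zero h0) (by norm_num))]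
      rcases Nat.mod_two_eq_zero_or_one n with h | h <;> simp [h]

-- LSB bits of m, fixed width w
def pvBitsW (m : Nat) (w : Nat) : List Int :=
  match w with
  | 0 => []
  | w + 1 => ((m % 2 : Nat) : Int) :: pvBitsW (m / 2) w

theorem pvBitsW_split (k m : Nat) (hm : m < 2 ^ (k + 1)) :
    pvBitsW m (k + 1) = pvBitsW (m % 2 ^ k) k ++ [((m / 2 ^ k : Nat) : Int)] := by
  induction k generalizing m with
  | zero =>
    have h2 : m = 0 ∨ m = 1 := by simp at hm; omega
    rcases h2 with rfl | rfl <;> decide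
  | succ k ih =>
    rw [pvBitsW]
    conv_rhs => rw [pvBitsW]
    have h1 : (m % 2 ^ (k + 1)) % 2 = m % 2 :=
      Nat.mod_mod_of_dvd m (dvd_pow_self 2 (Nat.succ_ne_zero k))
    have h2 : (m % 2 ^ (k + 1)) / 2 = (m / 2) % 2 ^ k := by
      rw [pow_succ', Nat.mod_mul_right_div_self]
    have h3 : m / 2 ^ (k + 1) = (m / 2) / 2 ^ k := by
      rw [pow_succ', Nat.div_div_eq_div_mul]
    rw [h1, h2, h3, ih (m / 2) (by
      have h4 : (2:ℕ) ^ (k + 1 + 1) = 2 ^ (k + 1) * 2 := by ring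
      omega)]
    simp

theorem pvPowers_eq (d j : ℕ) (n : ℕ) (hn : 0 < n) (hd : j + d = Nat.log2 n) :
    pvPowers (n : Int) ((2 : Int) ^ j) =
      (List.range' j (d + 1)).map (fun i => ((2 : Int) ^ i)) := by
  induction d generalizing j with
  | zero =>
    rw [pvPowers, dif_neg]
    · simp
    · rintro ⟨-, hle⟩
      have : ((2 : Int) ^ (j + 1) : Int) ≤ (n : Int) := by rw [pow_succ]; exact hle
      have h2 : (2 : ℕ) ^ (j + 1) ≤ n := by exact_mod_cast this
      have := (Nat.le_log2 (Nat.pos_iff_ne_zero.mp hn)).mpr h2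
      omega
  | succ d ih =>
    have hle : (2 : ℕ) ^ (j + 1) ≤ n :=
      (Nat.le_log2 (Nat.pos_iff_ne_zero.mp hn)).mp (by omega)
    rw [pvPowers, dif_pos]
    · have : (2 : Int) ^ j * 2 = (2 : Int) ^ (j + 1) := by ring
      rw [this, ih (j + 1) (by omega)]
      have hr : List.range' j (d + 1 + 1) = j :: (j + 1) :: List.range' (j + 1 + 1) d := by
        simp [List.range'_succ]
      rw [hr]
      simp [List.range'_succ]
    · constructor
      · positivity
      · have h5 : ((2 : ℕ) ^ (j + 1) : Int) ≤ (n : Int) := by exact_mod_cast hle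
        push_cast at h5
        rw [pow_succ] at h5
        omega

theorem pvGreedy_desc (k : ℕ) (m : ℕ) (hm : m < 2 ^ (k + 1)) :
    pvGreedy (m : Int) (((List.range' 0 (k + 1)).map fun i => ((2 : Int) ^ i)).reverse) =
      (pvBitsW m (k + 1)).reverse := by
  induction k generalizing m with
  | zero =>
    interval_cases m <;> simp [pvGreedy, pvBitsW]
  | succ k ih =>
    have hsplit : (List.range' 0 (k + 1 + 1)) = List.range' 0 (k + 1) ++ [k + 1] := by
      simp [List.range'_1_concat]
    rw [hsplit, List.map_append, List.reverse_append]
    simp only [List.map_cons, List.map_nil, List.reverse_cons, List.reverse_nil,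
      List.nil_append, List.singleton_append]
    rw [pvGreedy]
    rw [pvBitsW_split (k + 1) m hm]
    by_cases hge : (2 : ℕ) ^ (k + 1) ≤ m
    · have hge' : ((2 : Int) ^ (k + 1)) ≤ (m : Int) := by exact_mod_cast hge
      rw [if_pos hge']
      have hsub : (m : Int) - (2 : Int) ^ (k + 1) = ((m - 2 ^ (k + 1) : ℕ) : Int) := by
        push_cast [hge]; ring
      have hlt : m - 2 ^ (k + 1) < 2 ^ (k + 1) := by
        have : (2:ℕ) ^ (k + 1 + 1) = 2 ^ (k+1) * 2 := by ring
        omega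
      rw [hsub, ih _ hlt]
      have hdiv : m / 2 ^ (k + 1) = 1 := by
        apply Nat.div_eq_of_lt_le <;> simp <;> omega
      have hmod : m % 2 ^ (k + 1) = m - 2 ^ (k + 1) := by
        rw [Nat.mod_eq_sub_mod hge, Nat.mod_eq_of_lt hlt]
      rw [hdiv, hmod]
      simp
    · have hlt' : ¬ ((2 : Int) ^ (k + 1)) ≤ (m : Int) := by exact_mod_cast hge
      rw [if_neg hlt']
      rw [ih _ (by omega)]
      have hdiv : m / 2 ^ (k + 1) = 0 := Nat.div_eq_of_lt (by omega)
      have hmod : m % 2 ^ (k + 1) = m := Nat.mod_eq_of_lt (by omega)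
      rw [hdiv, hmod]
      simp

theorem pvBitsW_eq_natBits (n : ℕ) (hn : 0 < n) :
    pvBitsW n (Nat.log2 n + 1) = pvNatBits n := by
  induction n using Nat.strong_induction_on with
  | _ n ih =>
    by_cases h1 : n = 1
    · subst h1; rw [pvNatBits, pvNatBits]; decide
    · have h2 : 2 ≤ n := by omega
      have hlog : Nat.log2 n = Nat.log2 (n / 2) + 1 := by
        have hh := Nat.log2_eq_succ_log2_shiftRight (n := n) (by rw [Nat.shiftRight_one]; omega)
        rwa [Nat.shiftRight_one] at hh
      rw [pvNatBits, if_neg (by omega), hlog, pvBitsW]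
      rw [ih (n / 2) (Nat.div_lt_self hn (by norm_num)) (by omega)]

-- raw (unpadded) lists agree for n ≥ 0
theorem pvRaw_eq_nonneg (n : Int) (hn : 0 ≤ n) :
    (pvGreedy n (pvPowers n 1).reverse).reverse
      = (if n = 0 then [(0 : Int)] else []) ++ pvALoop n := by
  by_cases h0 : n = 0
  · subst h0; rw [pvALoop]; simp [pvPowers, pvGreedy]
  · have hm : n = ((n.toNat : ℕ) : Int) := by omega
    have hpos : 0 < n.toNat := by omega
    rw [if_neg h0, List.nil_append, hm, pvALoop_eq_natBits]
    have hp1 : ((2 : Int) ^ 0) = (1 : Int) := by norm_num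
    have hpw := pvPowers_eq (Nat.log2 n.toNat) 0 n.toNat hpos (by omega)
    rw [hp1] at hpw
    rw [hpw]
    have hlt : n.toNat < 2 ^ (Nat.log2 n.toNat + 1) :=
      (Nat.log2_lt (Nat.pos_iff_ne_zero.mp hpos)).mp (Nat.lt_succ_self _)
    rw [pvGreedy_desc (Nat.log2 n.toNat) n.toNat hlt, List.reverse_reverse,
      pvBitsW_eq_natBits n.toNat hpos]

-- for n < 0: A's raw list is [], B's raw list is [0]
theorem pvRawA_neg (n : Int) (hn : n < 0) : pvALoop n = [] := by
  rw [pvALoop, dif_neg (by omega)]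

theorem pvRawB_neg (n : Int) (hn : n < 0) :
    (pvGreedy n (pvPowers n 1).reverse).reverse = [0] := by
  rw [pvPowers, dif_neg (by omega)]
  simp [pvGreedy, if_neg (by omega : ¬ (1 : Int) ≤ n)]

-- padded components agree under Pre_
theorem pvPadded_eq (n : Int) (bs : Int) (h : 1 ≤ bs ∨ 0 ≤ n) :
    (let r := (if n = 0 then [(0 : Int)] else []) ++ pvALoop n
     if (r.length : Int) < bs then r ++ List.replicate (bs - r.length).toNat 0 else r)
      = pvToBits n bs := by
  by_cases hn : 0 ≤ n
  · unfold pvToBits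
    simp only [pvRaw_eq_nonneg n hn]
    set r := (if n = 0 then [(0 : Int)] else []) ++ pvALoop n with hr
    by_cases hlen : ((r.length : ℕ) : Int) < bs
    · rw [if_pos hlen]
    · rw [if_neg hlen]
      have h0 : (bs - ((r.length : ℕ) : Int)).toNat = 0 := by omega
      rw [h0, List.replicate_zero, List.append_nil]
  · have hneg : n < 0 := by omega
    have hbs : 1 ≤ bs := by tauto
    unfold pvToBits
    simp only [pvRawB_neg n hneg, pvRawA_neg n hneg, if_neg (by omega : ¬ n = 0),
      List.nil_append, List.append_nil, List.length_nil, List.length_cons,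
      Nat.cast_zero]
    rw [if_pos (by omega : (0 : Int) < bs)]
    have hb : (bs - 0).toNat = (bs - 1).toNat + 1 := by omega
    rw [hb, List.replicate_succ]
    simp

-- ===== VERDICT (by name: the statement is the Claim_ definition above) =====
theorem binary_converter_spec : Claim_equal_binary_converter := by
  intro i1 i2 bs _ hpre
  unfold Spec_binary_converter binary_converter binary_converter_alt
  have h1 : (1 ≤ bs ∨ 0 ≤ i1) := by unfold Pre_binary_converter at hpre; tauto
  have h2 : (1 ≤ bs ∨ 0 ≤ i2) := by unfold Pre_binary_converter at hpre; tauto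
  have e1 := pvPadded_eq i1 bs h1
  have e2 := pvPadded_eq i2 bs h2
  simp only at e1 e2
  rw [Prod.mk.injEq]
  exact ⟨e1, e2⟩
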